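-- pv_equiv track=rewrite | github.com/waterimp/sb3_extractor | sb3_extractor/__init__.py | sanitize_path_fragment
-- ===== SOURCE A (Python) =====
-- def sanitize_path_fragment(path):
--     # characters that will not cause us to write outside of the intended path and
--     # that will not cause inconveniences with command line or programmatic access.
--     SAFE_CHARACTERS = 'ABCDEFGHIJKLMNOPQRSTUVWXYZabcdefghijklmnopqrstuvwxyz0123456789-_.'
--     s = ''
--     for c in path:
--         if c in SAFE_CHARACTERS:
--             s += c
--     while '..' in s:
--         s = s.replace('..', '.')
--     return s
-- ===== SOURCE B (Python) =====
-- def sanitize_path_fragment(path):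
--     # Single pass: keep safe characters, and skip a '.' whenever the
--     # previously emitted character is already a '.' (collapses dot runs).
--     SAFE_CHARACTERS = frozenset(
--         'ABCDEFGHIJKLMNOPQRSTUVWXYZabcdefghijklmnopqrstuvwxyz0123456789-_.')
--     out = []
--     prev_dot = False
--     for c in path:
--         if c in SAFE_CHARACTERS:
--             if c == '.' and prev_dot:
--                 continue
--             out.append(c)
--             prev_dot = (c == '.')
--     return ''.join(out)
-- ===== Notes on version B (the rewrite author's own statement) =====
-- stated objective: alternative
-- what changed: Replaced the repeated whole-string replace('..','.') fixpoint loop with a single pass that appends safe characters and skips a dot when the previously emitted character is a dot.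
import Mathlib
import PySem

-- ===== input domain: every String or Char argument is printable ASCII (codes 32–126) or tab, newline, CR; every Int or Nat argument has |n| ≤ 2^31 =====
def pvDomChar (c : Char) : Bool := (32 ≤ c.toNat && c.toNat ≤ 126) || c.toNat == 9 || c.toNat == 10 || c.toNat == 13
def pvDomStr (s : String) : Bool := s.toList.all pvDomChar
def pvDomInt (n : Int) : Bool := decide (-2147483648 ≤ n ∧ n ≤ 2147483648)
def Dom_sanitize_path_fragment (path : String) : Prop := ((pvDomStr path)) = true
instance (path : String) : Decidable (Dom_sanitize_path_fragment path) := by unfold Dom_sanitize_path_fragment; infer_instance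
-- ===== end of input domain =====

-- B replaces A's repeated whole-string replace('..','.') fixpoint loop by a single
-- left-to-right pass that skips a '.' when the previously emitted char is a '.'.

-- ===== PORT A =====
-- s.replace('..', '.') on a list of chars: Python replaces non-overlapping
-- occurrences left to right; for the fixed 2-char pattern '..' that is exactly
-- this structural recursion (exact).
def pvRep : List Char → List Char
  | '.' :: '.' :: t => '.' :: pvRep t
  | c :: t => c :: pvRep t
  | [] => []

-- '..' in s : exact hand port of substring membership for the fixed pattern '..'.
def pvHasDD : List Char → Bool
  | '.' :: '.' :: _ => true
  | _ :: t => pvHasDD t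
  | [] => false

lemma pvRep_length_le (s : List Char) : (pvRep s).length ≤ s.length := by
  induction s using pvRep.induct <;> simp [pvRep] <;> omega

lemma pvRep_length_lt (s : List Char) (h : pvHasDD s = true) :
    (pvRep s).length < s.length := by
  induction s using pvRep.induct with
  | case1 t _ => have := pvRep_length_le t; simp [pvRep]; omega
  | case2 c t hne ih =>
      simp only [pvRep, List.length_cons]
      have h' : pvHasDD t = true := by
        cases t with
        | nil => simp [pvHasDD] at h
        | cons b u =>
          by_cases hc : c = '.' <;> by_cases hb : b = '.' <;>
            simp_all [pvHasDD]
      exact Nat.succ_lt_succ (ih h')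
  | case3 => simp [pvHasDD] at h

-- while '..' in s: s = s.replace('..','.')  (terminates: replace shrinks s)
def pvWhile (s : List Char) : List Char :=
  if h : pvHasDD s = true then pvWhile (pvRep s) else s
termination_by s.length
decreasing_by exact pvRep_length_lt s h

-- SAFE_CHARACTERS, shared constant of both ports
def pvSAFE : List Char := "ABCDEFGHIJKLMNOPQRSTUVWXYZabcdefghijklmnopqrstuvwxyz0123456789-_.".toList

def sanitize_path_fragment (path : String) : String :=
  -- s = ''; for c in path: if c in SAFE_CHARACTERS: s += c   (string += on char list)
  String.mk (pvWhile
    (path.toList.foldl (fun acc c => if pvSAFE.contains c then acc ++ [c] else acc) []))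

-- ===== PORT B =====
def sanitize_path_fragment_alt (path : String) : String :=
  -- out = []; prev_dot = False; one pass over path
  String.mk
    (path.toList.foldl
      (fun (st : List Char × Bool) c =>
        if pvSAFE.contains c then
          if c == '.' && st.2 then st
          else (st.1 ++ [c], c == '.')
        else st)
      ([], false)).1

-- ===== PRECONDITION & SPEC =====
def Spec_sanitize_path_fragment (path : String) (out : String) : Prop := out = sanitize_path_fragment_alt path
instance (path : String) (out : String) : Decidable (Spec_sanitize_path_fragment path out) := by unfold Spec_sanitize_path_fragment; infer_instance

-- ===== CLAIM (what is proved, stated in full; the proofs are below) =====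
def Claim_equal_sanitize_path_fragment : Prop := ∀ (path : String), Dom_sanitize_path_fragment path → Spec_sanitize_path_fragment path (sanitize_path_fragment path)

-- ===== LEMMAS AND PROOFS =====

-- normal form: collapse runs of dots; the Bool says whether the previously kept char is '.'
def pvSquash : Bool → List Char → List Char
  | _, [] => []
  | pd, c :: t =>
    if c = '.' then (if pd then pvSquash true t else '.' :: pvSquash true t)
    else c :: pvSquash false t

lemma squash_rep (s : List Char) :
    pvSquash false (pvRep s) = pvSquash false s ∧
    pvSquash true (pvRep s) = pvSquash true s := by
  induction s using pvRep.induct with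
  | case1 t ih => simp [pvRep, pvSquash, ih.2]
  | case2 c t hne ih =>
      by_cases hc : c = '.'
      · subst hc
        have ht : pvSquash true (pvRep t) = pvSquash true t := ih.2
        simp [pvRep, pvSquash, ht]
      · simp [pvRep, pvSquash, hc, ih.1]
  | case3 => exact ⟨rfl, rfl⟩

lemma squash_id (s : List Char) (h : pvHasDD s = false) : pvSquash false s = s := by
  induction s using pvHasDD.induct with
  | case1 t => simp [pvHasDD] at h
  | case2 c t hne ih =>
      have h' : pvHasDD t = false := by
        cases t with
        | nil => rfl
        | cons b u =>
          by_cases hc : c = '.' <;> by_cases hb : b = '.' <;> simp_all [pvHasDD]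
      by_cases hc : c = '.'
      · subst hc
        cases t with
        | nil => simp [pvSquash]
        | cons b u =>
          have hb : ¬ b = '.' := by
            intro hb; subst hb; exact absurd h (by simp [pvHasDD])
          have := ih h'
          simp [pvSquash, hb] at this ⊢
          exact this
      · simp [pvSquash, hc, ih h']
  | case3 => rfl

lemma while_eq_squash (s : List Char) : pvWhile s = pvSquash false s := by
  by_cases h : pvHasDD s = true
  · rw [pvWhile, dif_pos h, while_eq_squash (pvRep s), (squash_rep s).1]
  · rw [pvWhile, dif_neg h, squash_id s (by simpa using h)]
termination_by s.length
decreasing_by exact pvRep_length_lt s h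

lemma bloop (SAFE : List Char) (l : List Char) (out : List Char) (pd : Bool) :
    (l.foldl
      (fun (st : List Char × Bool) c =>
        if SAFE.contains c then
          if c == '.' && st.2 then st
          else (st.1 ++ [c], c == '.')
        else st)
      (out, pd)).1 = out ++ pvSquash pd (l.filter SAFE.contains) := by
  induction l generalizing out pd with
  | nil => simp [pvSquash]
  | cons c t ih =>
    rw [List.foldl_cons]
    by_cases hs : SAFE.contains c = true
    · rw [if_pos hs, List.filter_cons_of_pos hs]
      by_cases hc : c = '.'
      · subst hc
        cases pd with
        | true => rw [if_pos (by simp), ih]; simp [pvSquash]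
        | false => rw [if_neg (by simp), ih]; simp [pvSquash]
      · rw [if_neg (by simp [hc]), ih,
            show (c == '.') = false from beq_eq_false_iff_ne.mpr hc]
        simp [pvSquash, hc]
    · rw [if_neg hs, ih, List.filter_cons_of_neg (by simpa using hs)]

-- ===== VERDICT (by name: the statement is the Claim_ definition above) =====
theorem sanitize_path_fragment_spec : Claim_equal_sanitize_path_fragment := by
  intro path _
  show sanitize_path_fragment path = sanitize_path_fragment_alt path
  unfold sanitize_path_fragment sanitize_path_fragment_alt
  rw [PySem.List.foldl_append_if_eq_filter, bloop, while_eq_squash]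
  simp
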